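-- pv_equiv track=rewrite | github.com/Giosirbiladze/GOA-homework | day 24/homework/homework.py | difference_in_ages
-- ===== SOURCE A (Python) =====
-- def difference_in_ages(ages):
--     max_age = ages[0]
--     min_age = ages[0]
--     for i in ages:
--         if max_age < i:
--             max_age = i
--         elif min_age > i:
--             min_age = i
--     difference = max_age - min_age
--     return(min_age, max_age, difference)
-- ===== SOURCE B (Python) =====
-- def difference_in_ages(ages):
--     s = sorted(ages)
--     low, high = s[0], s[-1]
--     return (low, high, high - low)
-- ===== Notes on version B (the rewrite author's own statement) =====
-- stated objective: simpler
-- what changed: Replaces the single-pass min/max tracking loop with sorting once and reading the extrema as the endpoints of the sorted list.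
import Mathlib
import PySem

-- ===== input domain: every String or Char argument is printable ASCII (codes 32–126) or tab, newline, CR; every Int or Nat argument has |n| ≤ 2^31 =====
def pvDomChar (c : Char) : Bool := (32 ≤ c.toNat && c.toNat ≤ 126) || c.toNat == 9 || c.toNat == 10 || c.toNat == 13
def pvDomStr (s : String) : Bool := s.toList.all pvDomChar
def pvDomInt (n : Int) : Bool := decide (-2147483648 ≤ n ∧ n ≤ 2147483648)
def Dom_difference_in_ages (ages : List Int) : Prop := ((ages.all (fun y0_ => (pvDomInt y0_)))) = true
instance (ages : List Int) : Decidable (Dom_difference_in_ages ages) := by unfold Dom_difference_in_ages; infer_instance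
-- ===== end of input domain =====

-- B sorts the list once and reads min/max as the sorted endpoints, instead of A's single-pass min/max tracking loop.


-- ===== PORT A =====
def difference_in_ages (ages : List Int) : Int × Int × Int :=
  match PySem.List.pyGet? ages 0 with
  | none => (0, 0, 0)   -- ages[0] raises IndexError: outside Pre_
  | some a0 =>
    let r := ages.foldl (fun (st : Int × Int) i =>
      if st.1 < i then (i, st.2) else if st.2 > i then (st.1, i) else st) (a0, a0)
    (r.2, r.1, r.1 - r.2)

-- ===== PORT B =====
def difference_in_ages_alt (ages : List Int) : Int × Int × Int :=
  let s := PySem.List.sorted ages (fun x => x) false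
  match PySem.List.pyGet? s 0, PySem.List.pyGet? s (-1) with
  | some lo, some hi => (lo, hi, hi - lo)
  | _, _ => (0, 0, 0)   -- s[0] raises IndexError on empty input: outside Pre_

-- ===== PRECONDITION & SPEC =====
-- Pre_ excludes only the empty list, on which both Pythons raise IndexError.
def Pre_difference_in_ages (ages : List Int) : Prop := ages ≠ []
instance (ages : List Int) : Decidable (Pre_difference_in_ages ages) := by unfold Pre_difference_in_ages; infer_instance
def pvWitness_difference_in_ages : List Int := ([3, 1, 2])

def Spec_difference_in_ages (ages : List Int) (out : Int × Int × Int) : Prop := out = difference_in_ages_alt ages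
instance (ages : List Int) (out : Int × Int × Int) : Decidable (Spec_difference_in_ages ages out) := by unfold Spec_difference_in_ages; infer_instance

-- ===== CLAIM (what is proved, stated in full; the proofs are below) =====
def Claim_equal_difference_in_ages : Prop := ∀ (ages : List Int), Dom_difference_in_ages ages → Pre_difference_in_ages ages → Spec_difference_in_ages ages (difference_in_ages ages)

-- ===== LEMMAS AND PROOFS =====

-- A's loop state is exactly (running max, running min) once min ≤ max.
theorem pv_loop_eq (l : List Int) : ∀ mx mn : Int, mn ≤ mx →
    l.foldl (fun (st : Int × Int) i =>
      if st.1 < i then (i, st.2) else if st.2 > i then (st.1, i) else st) (mx, mn)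
    = (l.foldl max mx, l.foldl min mn) := by
  induction l with
  | nil => intro mx mn _; rfl
  | cons i t ih =>
    intro mx mn hle
    simp only [List.foldl_cons]
    by_cases h1 : mx < i
    · rw [if_pos h1, max_eq_right (le_of_lt h1), min_eq_left (by omega : mn ≤ i)]
      exact ih i mn (by omega)
    · by_cases h2 : mn > i
      · rw [if_neg h1, if_pos h2, max_eq_left (by omega : i ≤ mx), min_eq_right (by omega : i ≤ mn)]
        exact ih mx i (by omega)
      · rw [if_neg h1, if_neg h2, max_eq_left (by omega : i ≤ mx), min_eq_left (by omega : mn ≤ i)]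
        exact ih mx mn hle

theorem pv_foldl_min_bound (l : List Int) : ∀ a : Int, l.foldl min a ≤ a ∧ ∀ y ∈ l, l.foldl min a ≤ y := by
  induction l with
  | nil => intro a; simp
  | cons x t ih =>
    intro a
    simp only [List.foldl_cons, List.mem_cons]
    refine ⟨le_trans (ih (min a x)).1 (min_le_left a x), ?_⟩
    rintro y (rfl | hy)
    · exact le_trans (ih (min a y)).1 (min_le_right a y)
    · exact (ih (min a x)).2 y hy

theorem pv_foldl_min_mem (l : List Int) : ∀ a : Int, l.foldl min a ∈ a :: l := by
  induction l with
  | nil => intro a; simp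
  | cons x t ih =>
    intro a
    simp only [List.foldl_cons]
    rcases List.mem_cons.1 (ih (min a x)) with h | h
    · rcases min_choice a x with hc | hc <;> rw [h, hc] <;> simp
    · simp [h]

theorem pv_foldl_max_mem (l : List Int) : ∀ a : Int, l.foldl max a ∈ a :: l := by
  induction l with
  | nil => intro a; simp
  | cons x t ih =>
    intro a
    simp only [List.foldl_cons]
    rcases List.mem_cons.1 (ih (max a x)) with h | h
    · rcases max_choice a x with hc | hc <;> rw [h, hc] <;> simp
    · simp [h]

-- every element of the sorted list is ≤ its last element
theorem pv_le_getLast (xs : List Int) (h : PySem.List.sorted xs (fun x => x) false ≠ [])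
    (y : Int) (hy : y ∈ PySem.List.sorted xs (fun x => x) false) :
    y ≤ (PySem.List.sorted xs (fun x => x) false).getLast h := by
  obtain ⟨p, hp, hpy⟩ := List.mem_iff_getElem.1 hy
  have hpos : 0 < (PySem.List.sorted xs (fun x => x) false).length := List.length_pos_iff.2 h
  rw [List.getLast_eq_getElem, ← hpy]
  exact PySem.List.key_sorted_getElem_mono xs (fun x => x) (by omega) (by omega)

-- ===== VERDICT (by name: the statement is the Claim_ definition above) =====
theorem difference_in_ages_spec : Claim_equal_difference_in_ages := by
  intro ages _ hpre
  unfold Spec_difference_in_ages difference_in_ages difference_in_ages_alt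
  match hA : ages with
  | [] => exact absurd rfl hpre
  | a0 :: rest =>
    have hget0 : PySem.List.pyGet? (a0 :: rest) 0 = some a0 := by
      simp [PySem.List.pyGet?, PySem.List.pyIdx?]
    rw [hget0]
    -- B side: name the sorted list and its shape
    have hsne : PySem.List.sorted (a0 :: rest) (fun x => x) false ≠ [] := by
      rw [Ne, PySem.List.sorted_eq_nil_iff]; simp
    obtain ⟨h0, t, hst⟩ : ∃ h0 t, PySem.List.sorted (a0 :: rest) (fun x => x) false = h0 :: t := by
      rcases hs : PySem.List.sorted (a0 :: rest) (fun x => x) false with _ | ⟨h0, t⟩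
      · exact absurd hs hsne
      · exact ⟨h0, t, rfl⟩
    have hgetS0 : PySem.List.pyGet? (PySem.List.sorted (a0 :: rest) (fun x => x) false) 0 = some h0 := by
      rw [hst]; simp [PySem.List.pyGet?, PySem.List.pyIdx?]
    have hgetS1 : PySem.List.pyGet? (PySem.List.sorted (a0 :: rest) (fun x => x) false) (-1)
        = some ((PySem.List.sorted (a0 :: rest) (fun x => x) false).getLast hsne) := by
      rw [PySem.List.pyGet?_neg_one, List.getLast?_eq_some_getLast hsne]
    simp only [hgetS0, hgetS1]
    -- A's loop value
    have hloop : (a0 :: rest).foldl (fun (st : Int × Int) i =>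
        if st.1 < i then (i, st.2) else if st.2 > i then (st.1, i) else st) (a0, a0)
        = (rest.foldl max a0, rest.foldl min a0) := by
      simp only [List.foldl_cons]
      rw [show (if (a0:Int) < a0 then ((a0:Int), (a0:Int)) else if a0 > a0 then (a0, a0) else (a0, a0)) = (a0, a0) by simp]
      exact pv_loop_eq rest a0 a0 le_rfl
    rw [hloop]
    -- membership transfer between ages and its sorted rearrangement
    have hperm := PySem.List.sorted_perm (a0 :: rest) (fun x => x) false
    -- min: h0 = rest.foldl min a0
    have hmin : h0 = rest.foldl min a0 := by
      have h1 : h0 ≤ rest.foldl min a0 :=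
        PySem.List.key_head_sorted_le (a0 :: rest) (fun x => x) hst _ (pv_foldl_min_mem rest a0)
      have h0mem : h0 ∈ a0 :: rest := hperm.mem_iff.1 (by rw [hst]; simp)
      have h2 : rest.foldl min a0 ≤ h0 := by
        rcases List.mem_cons.1 h0mem with h | h
        · rw [h]; exact (pv_foldl_min_bound rest a0).1
        · exact (pv_foldl_min_bound rest a0).2 h0 h
      omega
    -- max: getLast = rest.foldl max a0
    have hmax : (PySem.List.sorted (a0 :: rest) (fun x => x) false).getLast hsne = rest.foldl max a0 := by
      have hmxmem : rest.foldl max a0 ∈ PySem.List.sorted (a0 :: rest) (fun x => x) false :=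
        hperm.mem_iff.2 (pv_foldl_max_mem rest a0)
      have h1 : rest.foldl max a0 ≤ (PySem.List.sorted (a0 :: rest) (fun x => x) false).getLast hsne :=
        pv_le_getLast _ hsne _ hmxmem
      have hLmem : (PySem.List.sorted (a0 :: rest) (fun x => x) false).getLast hsne ∈ a0 :: rest :=
        hperm.mem_iff.1 (List.getLast_mem hsne)
      have h2 : (PySem.List.sorted (a0 :: rest) (fun x => x) false).getLast hsne ≤ rest.foldl max a0 := by
        rcases List.mem_cons.1 hLmem with h | h
        · rw [h]; exact (PySem.List.le_foldl_max rest a0).1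
        · exact (PySem.List.le_foldl_max rest a0).2 _ h
      omega
    rw [hmin, hmax]
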